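-- pv_equiv track=rewrite | github.com/mgcha85/leetcode | robinhood/coding_test.py | sortMatrixByOccurrences
-- ===== SOURCE A (Python) =====
-- def sortMatrixByOccurrences(matrix):
--     if not matrix:
--         return
--     if not matrix[0]:
--         return
--
--     m = len(matrix)
--     freq = {}
--     for r in range(m):
--         for c in range(m):
--             freq[matrix[r][c]] = freq.get(matrix[r][c], 0) + 1
--
--     freq = sorted(freq.items(), key=lambda x: (x[1], x[0]))
--     r = c = m-1
--     sr, sc = m-1, m-1
--     dr, dc = -1, 1
--     for ele in freq:
--         v, f = ele
--         for i in range(f):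
--             matrix[r][c] = v
--             cr, cc = r + dr, c + dc
--             if not(0 <= cr < m) or not(0 <= cc < m):
--                 sc -= 1
--                 if sc < 0:
--                     sr -= 1
--                     sc = 0
--                 r, c = sr, sc
--             else:
--                 r, c = cr, cc
--     return matrix
-- ===== SOURCE B (Python) =====
-- def sortMatrixByOccurrences(matrix):
--     if not matrix:
--         return
--     if not matrix[0]:
--         return
--     m = len(matrix)
--     cells = [matrix[r][c] for r in range(m) for c in range(m)]
--     freq = {}
--     for v in cells:
--         freq[v] = freq.get(v, 0) + 1
--     values = []
--     for v, f in sorted(freq.items(), key=lambda x: (x[1], x[0])):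
--         values += [v] * f
--     idx = 0
--     for d in range(2 * m - 2, -1, -1):
--         for r in range(min(m - 1, d), max(0, d - (m - 1)) - 1, -1):
--             matrix[r][d - r] = values[idx]
--             idx += 1
--     return matrix
-- ===== Notes on version B (the rewrite author's own statement) =====
-- stated objective: alternative
-- what changed: Replaces A's stateful stateful diagonal cursor (r,c,sr,sc with delta stepping and start-cell bookkeeping) by direct arithmetic over anti-diagonals (d from 2m-2 down to 0, r from min(m-1,d) down to max(0,d-(m-1))) filling from a pre-expanded flat list of values, and counts frequencies in one pass over a flattened cell list instead of nested index loops.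
import Mathlib
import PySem

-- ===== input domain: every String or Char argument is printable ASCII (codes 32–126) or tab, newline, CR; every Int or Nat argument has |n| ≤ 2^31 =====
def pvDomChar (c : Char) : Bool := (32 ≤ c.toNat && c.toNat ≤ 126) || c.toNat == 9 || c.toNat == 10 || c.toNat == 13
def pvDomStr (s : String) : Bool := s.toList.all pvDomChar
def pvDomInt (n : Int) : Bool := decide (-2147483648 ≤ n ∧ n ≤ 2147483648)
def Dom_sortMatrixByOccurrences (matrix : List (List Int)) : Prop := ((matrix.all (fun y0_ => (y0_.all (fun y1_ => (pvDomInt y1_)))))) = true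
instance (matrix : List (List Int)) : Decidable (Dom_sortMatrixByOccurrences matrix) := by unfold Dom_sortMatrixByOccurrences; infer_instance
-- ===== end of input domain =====

-- B replaces A's stateful diagonal cursor (r,c,sr,sc delta-stepping) by direct arithmetic over
-- anti-diagonals and flattens the counting/expansion into list building; equal return values — both
-- the Python A and the Python B also mutate `matrix` in place in the same way, the theorems here are
-- about the returned value.

-- shared primitive: matrix[r][c] = v (both programs only assign at indices 0 ≤ r,c < len(matrix),
-- where Python's assignment and this List.set/modify agree)
def set2 (mat : List (List Int)) (r c v : Int) : List (List Int) :=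
  mat.modify r.toNat (fun row => row.set c.toNat v)

-- ===== PORT A =====
def sortMatrixByOccurrences (matrix : List (List Int)) : List (List Int) :=
  if matrix.length = 0 then matrix
  else if (matrix.headD []).length = 0 then matrix
  else
    let m : Int := matrix.length
    let freq : PySem.Dict Int Int :=
      (PySem.List.pyRange 0 m 1).foldl (fun d r =>
        (PySem.List.pyRange 0 m 1).foldl (fun d c =>
          d.insert (PySem.List.pyGetD (PySem.List.pyGetD matrix r []) c 0)
            (d.getD (PySem.List.pyGetD (PySem.List.pyGetD matrix r []) c 0) 0 + 1)) d)
        PySem.Dict.empty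
    let freqL := PySem.List.sorted2 freq.items (fun x => x.2) (fun x => x.1)
    (freqL.foldl (fun st ele =>
      (PySem.List.pyRange 0 ele.2 1).foldl (fun st (_ : Int) =>
        let mat := set2 st.1 st.2.1 st.2.2.1 ele.1
        let cr := st.2.1 - 1
        let cc := st.2.2.1 + 1
        if ¬(0 ≤ cr ∧ cr < m) ∨ ¬(0 ≤ cc ∧ cc < m) then
          if st.2.2.2.2 - 1 < 0 then (mat, st.2.2.2.1 - 1, 0, st.2.2.2.1 - 1, 0)
          else (mat, st.2.2.2.1, st.2.2.2.2 - 1, st.2.2.2.1, st.2.2.2.2 - 1)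
        else (mat, cr, cc, st.2.2.2.1, st.2.2.2.2)) st)
      (matrix, m - 1, m - 1, m - 1, m - 1)).1

-- ===== PORT B =====
def sortMatrixByOccurrences_alt (matrix : List (List Int)) : List (List Int) :=
  if matrix.length = 0 then matrix
  else if (matrix.headD []).length = 0 then matrix
  else
    let m : Int := matrix.length
    let cells := (PySem.List.pyRange 0 m 1).flatMap (fun r =>
      (PySem.List.pyRange 0 m 1).map (fun c =>
        PySem.List.pyGetD (PySem.List.pyGetD matrix r []) c 0))
    let freq := cells.foldl (fun d v => d.insert v (d.getD v 0 + 1)) (PySem.Dict.empty : PySem.Dict Int Int)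
    let values := (PySem.List.sorted2 freq.items (fun x => x.2) (fun x => x.1)).foldl
      (fun acc p => acc ++ List.replicate p.2.toNat p.1) []
    ((PySem.List.pyRange (2 * m - 2) (-1) (-1)).foldl (fun st d =>
      (PySem.List.pyRange (min (m - 1) d) (max 0 (d - (m - 1)) - 1) (-1)).foldl (fun st r =>
        (set2 st.1 r (d - r) (PySem.List.pyGetD values st.2 0), st.2 + 1)) st)
      (matrix, (0 : Int))).1

-- ===== PRECONDITION & SPEC =====
-- Pre_ excludes exactly the inputs where the Python A does not return a list: the empty matrix and a
-- matrix with empty first row (A returns None there), and matrices with a row shorter than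
-- len(matrix) (A raises IndexError while counting the m×m square).
def Pre_sortMatrixByOccurrences (matrix : List (List Int)) : Prop :=
  matrix ≠ [] ∧ matrix.headD [] ≠ [] ∧ ∀ row ∈ matrix, matrix.length ≤ row.length
instance (matrix : List (List Int)) : Decidable (Pre_sortMatrixByOccurrences matrix) := by
  unfold Pre_sortMatrixByOccurrences; infer_instance
def pvWitness_sortMatrixByOccurrences : List (List Int) := [[1, 2], [3, 1]]

def Spec_sortMatrixByOccurrences (matrix : List (List Int)) (out : List (List Int)) : Prop := out = sortMatrixByOccurrences_alt matrix
instance (matrix : List (List Int)) (out : List (List Int)) : Decidable (Spec_sortMatrixByOccurrences matrix out) := by unfold Spec_sortMatrixByOccurrences; infer_instance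

-- ===== CLAIM (what is proved, stated in full; the proofs are below) =====
def Claim_equal_sortMatrixByOccurrences : Prop := ∀ (matrix : List (List Int)), Dom_sortMatrixByOccurrences matrix → Pre_sortMatrixByOccurrences matrix → Spec_sortMatrixByOccurrences matrix (sortMatrixByOccurrences matrix)

-- ===== LEMMAS AND PROOFS =====

-- A's cursor update: one advance of (r, c, sr, sc) after a write, exactly A's branch structure
def advance (m : Int) (st : Int × Int × Int × Int) : Int × Int × Int × Int :=
  if ¬(0 ≤ st.1 - 1 ∧ st.1 - 1 < m) ∨ ¬(0 ≤ st.2.1 + 1 ∧ st.2.1 + 1 < m) then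
    if st.2.2.2 - 1 < 0 then (st.2.2.1 - 1, 0, st.2.2.1 - 1, 0)
    else (st.2.2.1, st.2.2.2 - 1, st.2.2.1, st.2.2.2 - 1)
  else (st.1 - 1, st.2.1 + 1, st.2.2.1, st.2.2.2)

-- the first n cells visited by A's cursor, starting from cursor state st
def trajFrom (m : Int) (st : Int × Int × Int × Int) : Nat → List (Int × Int)
  | 0 => []
  | n + 1 => (st.1, st.2.1) :: trajFrom m (advance m st) n

-- A's loop body: write the value, advance the cursor
def stepA (m : Int) (st : List (List Int) × Int × Int × Int × Int) (v : Int) :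
    List (List Int) × Int × Int × Int × Int :=
  (set2 st.1 st.2.1 st.2.2.1 v, advance m st.2)

-- write a (position, value) pair
def wr (mat : List (List Int)) (p : (Int × Int) × Int) : List (List Int) :=
  set2 mat p.1.1 p.1.2 p.2

-- B's fill positions on diagonals d, d-1, …, 0
def posFrom (m d : Int) : List (Int × Int) :=
  (PySem.List.pyRange d (-1) (-1)).flatMap (fun d' =>
    (PySem.List.pyRange (min (m - 1) d') (max 0 (d' - (m - 1)) - 1) (-1)).map (fun r => (r, d' - r)))

-- A's cursor state when it first reaches diagonal d
def startSt (m d : Int) : Int × Int × Int × Int :=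
  if d ≤ m - 1 then (d, 0, d, 0) else (m - 1, d - (m - 1), m - 1, d - (m - 1))

lemma foldl_const_replicate {α β γ : Type} (l : List β) (g : α → γ → α) (x : γ) :
    ∀ s : α, l.foldl (fun a _ => g a x) s = (List.replicate l.length x).foldl g s := by
  induction l with
  | nil => intro s; rfl
  | cons y t ih => intro s; simpa [List.replicate_succ] using ih (g s x)

lemma foldl_stepA_zip (m : Int) : ∀ (vs : List Int) (st : List (List Int) × Int × Int × Int × Int),
    (vs.foldl (stepA m) st).1 = ((trajFrom m st.2 vs.length).zip vs).foldl wr st.1 := by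
  intro vs
  induction vs with
  | nil => intro st; rfl
  | cons v t ih =>
      intro st
      simpa [stepA, trajFrom, wr] using ih (stepA m st v)

lemma foldl_idx_zip (values : List Int) :
    ∀ (ps : List (Int × Int)) (k : Nat) (mat : List (List Int)),
    k + ps.length ≤ values.length →
    (ps.foldl (fun st p => (set2 st.1 p.1 p.2 (PySem.List.pyGetD values st.2 0), st.2 + 1))
        (mat, (k : Int))).1
      = (ps.zip (values.drop k)).foldl wr mat := by
  intro ps
  induction ps with
  | nil => intro k mat h; rfl
  | cons p t ih =>
      intro k mat h
      have hk : k < values.length := by simp only [List.length_cons] at h; omega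
      have hdrop : values.drop k = values[k] :: values.drop (k + 1) :=
        List.drop_eq_getElem_cons hk
      have hget : PySem.List.pyGetD values ((k : Nat) : Int) 0 = values[k] := by
        rw [PySem.List.pyGetD_natCast, List.getD_eq_getElem?_getD]
        simp [hk]
      have hc : ((k : Int) + 1) = (((k + 1 : Nat)) : Int) := by push_cast; ring
      simp only [List.foldl_cons, hget, hc, hdrop, List.zip_cons_cons]
      rw [ih (k + 1) _ (by simp only [List.length_cons] at h; omega)]
      rfl

lemma walk (m sr sc : Int) (hsc : 0 ≤ sc) (hsr : sr ≤ m - 1)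
    (hcor : sc = 0 ∨ sr = m - 1) :
    ∀ (j : Nat) (n : Nat), sc + j ≤ sr →
    trajFrom m (sc + j, sr - j, sr, sc) (j + 1 + n)
      = ((PySem.List.pyRange (sc + j) (sc - 1) (-1)).map (fun r => (r, sr + sc - r)))
        ++ trajFrom m
            (if sc - 1 < 0 then (sr - 1, 0, sr - 1, 0) else (sr, sc - 1, sr, sc - 1)) n := by
  intro j
  induction j with
  | zero =>
      intro n hj
      have e1 : sc + ((0 : Nat) : Int) = sc := by push_cast; ring
      have e2 : sr - ((0 : Nat) : Int) = sr := by push_cast; ring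
      have e3 : 0 + 1 + n = n + 1 := by omega
      rw [e1, e2, e3]
      have hcond : (¬(0 ≤ sc - 1 ∧ sc - 1 < m) ∨ ¬(0 ≤ sr + 1 ∧ sr + 1 < m)) := by
        rcases hcor with h | h
        · left; omega
        · right; omega
      have hadv : advance m (sc, sr, sr, sc)
          = (if sc - 1 < 0 then (sr - 1, 0, sr - 1, 0) else (sr, sc - 1, sr, sc - 1)) := by
        simp only [advance]
        rw [if_pos hcond]
      have hr : PySem.List.pyRange sc (sc - 1) (-1) = [sc] := by
        rw [PySem.List.pyRange_neg_one_cons (by omega), PySem.List.pyRange_neg_one_eq_nil (by omega)]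
      have e4 : sr + sc - sc = sr := by ring
      simp only [trajFrom, hadv, hr, List.map_cons, List.map_nil, e4, List.cons_append,
        List.nil_append]
  | succ j ih =>
      intro n hj
      have e1 : sc + ((j + 1 : Nat) : Int) = (sc + j) + 1 := by push_cast; ring
      have e2 : sr - ((j + 1 : Nat) : Int) = (sr - j) - 1 := by push_cast; ring
      have e3 : j + 1 + 1 + n = (j + 1 + n) + 1 := by omega
      rw [e1, e2, e3]
      have hjz : sc + (j : Int) ≤ sr := by push_cast at hj ⊢; omega
      have hcond : ¬(¬(0 ≤ (sc + j + 1) - 1 ∧ (sc + j + 1) - 1 < m) ∨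
          ¬(0 ≤ (sr - j - 1) + 1 ∧ (sr - j - 1) + 1 < m)) := by
        push_cast at hjz
        rcases hcor with h | h <;> omega
      have hadv : advance m (sc + j + 1, sr - j - 1, sr, sc) = (sc + j, sr - j, sr, sc) := by
        simp only [advance]
        rw [if_neg hcond]
        have a1 : sc + j + 1 - 1 = sc + j := by ring
        have a2 : sr - j - 1 + 1 = sr - j := by ring
        rw [a1, a2]
      have hr : PySem.List.pyRange (sc + j + 1) (sc - 1) (-1)
          = (sc + j + 1) :: PySem.List.pyRange (sc + j) (sc - 1) (-1) := by
        rw [PySem.List.pyRange_neg_one_cons (by omega)]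
        have : sc + j + 1 - 1 = sc + j := by ring
        rw [this]
      have e4 : sr + sc - (sc + j + 1) = sr - j - 1 := by ring
      simp only [trajFrom, hadv, hr, List.map_cons, e4, List.cons_append]
      exact congrArg _ (ih n hjz)


lemma posFrom_len_step (m d : Int) (h0 : 0 ≤ d) (hd : d ≤ 2 * m - 2) :
    ((posFrom m d).length : Int)
      = (min (m - 1) d - max 0 (d - (m - 1)) + 1) + ((posFrom m (d - 1)).length : Int) := by
  rw [posFrom, PySem.List.pyRange_neg_one_cons (by omega : (-1 : Int) < d), List.flatMap_cons,
    ← posFrom, List.length_append, List.length_map, PySem.List.length_pyRange_neg_one]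
  have hge : (0:Int) ≤ min (m - 1) d - (max 0 (d - (m - 1)) - 1) := by
    rw [min_def, max_def]; split_ifs <;> omega
  rw [Int.natCast_add, Int.toNat_of_nonneg hge]
  ring


lemma diag_step (m d : Int) (h0 : 0 ≤ d) (hd : d ≤ 2 * m - 2)
    (hIH : trajFrom m (startSt m (d - 1)) ((posFrom m (d - 1)).length) = posFrom m (d - 1)) :
    trajFrom m (startSt m d) ((posFrom m d).length) = posFrom m d := by
  set sr : Int := if d ≤ m - 1 then d else m - 1 with hsrdef
  set sc : Int := if d ≤ m - 1 then 0 else d - (m - 1) with hscdef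
  have hsc : 0 ≤ sc := by rw [hscdef]; split_ifs <;> omega
  have hsr : sr ≤ m - 1 := by rw [hsrdef]; split_ifs <;> omega
  have hscsr : sc ≤ sr := by rw [hscdef, hsrdef]; split_ifs <;> omega
  have hdsum : d = sr + sc := by rw [hscdef, hsrdef]; split_ifs <;> omega
  have hcor : sc = 0 ∨ sr = m - 1 := by
    rw [hscdef, hsrdef]; split_ifs
    · left; rfl
    · right; rfl
  have hstart : startSt m d = (sr, sc, sr, sc) := by
    rw [startSt, hsrdef, hscdef]; split_ifs <;> rfl
  have hmin : min (m - 1) d = sr := by rw [hsrdef]; split_ifs <;> omega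
  have hmax : max 0 (d - (m - 1)) = sc := by rw [hscdef]; split_ifs <;> omega
  have hsplit : posFrom m d
      = ((PySem.List.pyRange sr (sc - 1) (-1)).map (fun r => (r, sr + sc - r)))
        ++ posFrom m (d - 1) := by
    rw [posFrom, PySem.List.pyRange_neg_one_cons (by omega : (-1 : Int) < d), List.flatMap_cons,
      hmin, hmax, ← posFrom]
    congr 1
    · exact List.map_congr_left (fun r _ => by rw [← hdsum])
  have hlen1 : ((PySem.List.pyRange sr (sc - 1) (-1)).map
      (fun r => (r, sr + sc - r))).length = (sr - sc).toNat + 1 := by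
    rw [List.length_map, PySem.List.length_pyRange_neg_one]
    omega
  have hend : (if sc - 1 < 0 then (sr - 1, 0, sr - 1, 0) else (sr, sc - 1, sr, sc - 1))
      = startSt m (d - 1) := by
    rw [startSt, hscdef, hsrdef]
    by_cases hdm : d ≤ m - 1
    · simp only [if_pos hdm]
      rw [if_pos (by omega : (0:Int) - 1 < 0), if_pos (by omega : d - 1 ≤ m - 1)]
    · simp only [if_neg hdm]
      by_cases hz : d - (m - 1) - 1 < 0
      · rw [if_pos hz, if_pos (by omega : d - 1 ≤ m - 1)]
        simp only [Prod.mk.injEq]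
        omega
      · rw [if_neg hz]
        by_cases hm2 : d - 1 ≤ m - 1
        · rw [if_pos hm2]
          simp only [Prod.mk.injEq]
          omega
        · rw [if_neg hm2]
          simp only [Prod.mk.injEq]
          exact ⟨trivial, by ring, trivial, by ring⟩
  have hj1 : sc + (((sr - sc).toNat : Nat) : Int) = sr := by omega
  have hj2 : sr - (((sr - sc).toNat : Nat) : Int) = sc := by omega
  have hw := walk m sr sc hsc hsr hcor (sr - sc).toNat ((posFrom m (d - 1)).length)
    (by omega)
  rw [hj1, hj2, hend, hIH] at hw
  rw [hsplit, hstart, List.length_append, hlen1]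
  exact hw


lemma diags (m : Int) : ∀ (dn : Nat) (d : Int), d = dn → d ≤ 2 * m - 2 →
    trajFrom m (startSt m d) ((posFrom m d).length) = posFrom m d := by
  intro dn
  induction dn with
  | zero =>
      intro d hdn hd
      refine diag_step m d (by omega) hd ?_
      have : posFrom m (d - 1) = [] := by
        rw [posFrom, PySem.List.pyRange_neg_one_eq_nil (by omega)]
        rfl
      rw [this]
      rfl
  | succ k ih =>
      intro d hdn hd
      refine diag_step m d (by omega) hd (ih (d - 1) (by omega) (by omega))


lemma posFrom_two_len (m : Int) (hm : 1 ≤ m) : ∀ (dn : Nat) (d : Int), d = dn → d ≤ 2 * m - 2 →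
    2 * ((posFrom m d).length : Int)
      = if d ≤ m - 1 then (d + 1) * (d + 2) else 2 * m * m - (2 * m - 2 - d) * (2 * m - 1 - d) := by
  intro dn
  induction dn with
  | zero =>
      intro d hdn hd
      have h0 : d = 0 := by omega
      subst h0
      have hnil : posFrom m (0 - 1) = [] := by
        rw [posFrom, PySem.List.pyRange_neg_one_eq_nil (by omega)]; rfl
      rw [posFrom_len_step m 0 le_rfl (by omega), hnil, if_pos (by omega : (0:Int) ≤ m - 1)]
      have h1 : min (m - 1) 0 = 0 := by omega
      have h2 : max 0 (0 - (m - 1)) = 0 := by omega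
      rw [h1, h2]
      norm_num
  | succ k ih =>
      intro d hdn hd
      have h1 : 0 ≤ d := by omega
      have ihd := ih (d - 1) (by omega) (by omega)
      rw [posFrom_len_step m d h1 hd]
      by_cases hdm : d ≤ m - 1
      · have hmin : min (m - 1) d = d := by omega
        have hmax : max 0 (d - (m - 1)) = 0 := by omega
        rw [hmin, hmax, if_pos hdm, if_pos (by omega : d - 1 ≤ m - 1)] at *
        linear_combination ihd
      · have hmin : min (m - 1) d = m - 1 := by omega
        have hmax : max 0 (d - (m - 1)) = d - (m - 1) := by omega
        rw [hmin, hmax, if_neg hdm]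
        by_cases hdm2 : d - 1 ≤ m - 1
        · rw [if_pos hdm2] at ihd
          have hde : d = m := by omega
          subst hde
          linear_combination ihd
        · rw [if_neg hdm2] at ihd
          linear_combination ihd

lemma posFrom_len (m : Int) (hm : 1 ≤ m) :
    ((posFrom m (2 * m - 2)).length : Int) = m * m := by
  have h := posFrom_two_len m hm (2 * m - 2).toNat (2 * m - 2) (by omega) (by omega)
  by_cases hm1 : 2 * m - 2 ≤ m - 1
  · simp only [if_pos hm1] at h; nlinarith
  · simp only [if_neg hm1] at h; nlinarith

lemma startSt_top (m : Int) (hm : 1 ≤ m) :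
    startSt m (2 * m - 2) = (m - 1, m - 1, m - 1, m - 1) := by
  unfold startSt
  by_cases h : 2 * m - 2 ≤ m - 1
  · have : m = 1 := by omega
    simp [this]
  · have h2 : 2 * m - 2 - (m - 1) = m - 1 := by omega
    simp only [if_neg h, h2]


lemma A_flat (m : Int) (freqL : List (Int × Int)) (init : List (List Int) × Int × Int × Int × Int) :
    List.foldl (fun st ele => List.foldl (fun st (_ : Int) =>
        if ¬(0 ≤ st.2.1 - 1 ∧ st.2.1 - 1 < m) ∨ ¬(0 ≤ st.2.2.1 + 1 ∧ st.2.2.1 + 1 < m) then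
          if st.2.2.2.2 - 1 < 0 then (set2 st.1 st.2.1 st.2.2.1 ele.1, st.2.2.2.1 - 1, 0, st.2.2.2.1 - 1, 0)
          else (set2 st.1 st.2.1 st.2.2.1 ele.1, st.2.2.2.1, st.2.2.2.2 - 1, st.2.2.2.1, st.2.2.2.2 - 1)
        else (set2 st.1 st.2.1 st.2.2.1 ele.1, st.2.1 - 1, st.2.2.1 + 1, st.2.2.2.1, st.2.2.2.2))
      st (PySem.List.pyRange 0 ele.2)) init freqL
    = List.foldl (stepA m) init (freqL.flatMap (fun p => List.replicate p.2.toNat p.1)) := by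
  rw [List.foldl_flatMap]
  have hfun : (fun (st : List (List Int) × Int × Int × Int × Int) (ele : Int × Int) =>
      List.foldl (fun st (_ : Int) =>
        if ¬(0 ≤ st.2.1 - 1 ∧ st.2.1 - 1 < m) ∨ ¬(0 ≤ st.2.2.1 + 1 ∧ st.2.2.1 + 1 < m) then
          if st.2.2.2.2 - 1 < 0 then (set2 st.1 st.2.1 st.2.2.1 ele.1, st.2.2.2.1 - 1, 0, st.2.2.2.1 - 1, 0)
          else (set2 st.1 st.2.1 st.2.2.1 ele.1, st.2.2.2.1, st.2.2.2.2 - 1, st.2.2.2.1, st.2.2.2.2 - 1)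
        else (set2 st.1 st.2.1 st.2.2.1 ele.1, st.2.1 - 1, st.2.2.1 + 1, st.2.2.2.1, st.2.2.2.2))
      st (PySem.List.pyRange 0 ele.2))
      = (fun st ele => List.foldl (stepA m) st (List.replicate ele.2.toNat ele.1)) := by
    funext st ele
    have hb : (fun (st : List (List Int) × Int × Int × Int × Int) (_ : Int) =>
        if ¬(0 ≤ st.2.1 - 1 ∧ st.2.1 - 1 < m) ∨ ¬(0 ≤ st.2.2.1 + 1 ∧ st.2.2.1 + 1 < m) then
          if st.2.2.2.2 - 1 < 0 then (set2 st.1 st.2.1 st.2.2.1 ele.1, st.2.2.2.1 - 1, 0, st.2.2.2.1 - 1, 0)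
          else (set2 st.1 st.2.1 st.2.2.1 ele.1, st.2.2.2.1, st.2.2.2.2 - 1, st.2.2.2.1, st.2.2.2.2 - 1)
        else (set2 st.1 st.2.1 st.2.2.1 ele.1, st.2.1 - 1, st.2.2.1 + 1, st.2.2.2.1, st.2.2.2.2))
        = (fun st _ => stepA m st ele.1) := by
      funext st u
      simp only [stepA, advance]
      split_ifs <;> rfl
    rw [hb, foldl_const_replicate, PySem.List.length_pyRange_one]
    norm_num
  rw [hfun]

lemma B_flat (m : Int) (values : List Int) (init : List (List Int) × Int) :
    List.foldl (fun st d => List.foldl (fun st r =>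
        (set2 st.1 r (d - r) (PySem.List.pyGetD values st.2 0), st.2 + 1)) st
      (PySem.List.pyRange (min (m - 1) d) (max 0 (d - (m - 1)) - 1) (-1))) init
      (PySem.List.pyRange (2 * m - 2) (-1) (-1))
    = List.foldl (fun st p => (set2 st.1 p.1 p.2 (PySem.List.pyGetD values st.2 0), st.2 + 1))
        init (posFrom m (2 * m - 2)) := by
  rw [posFrom, List.foldl_flatMap]
  simp only [List.foldl_map]

lemma freq_flat (matrix : List (List Int)) (m : Int) :
    List.foldl (fun d r => List.foldl (fun d c =>
        d.insert (PySem.List.pyGetD (PySem.List.pyGetD matrix r []) c 0)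
          (d.getD (PySem.List.pyGetD (PySem.List.pyGetD matrix r []) c 0) 0 + 1)) d
      (PySem.List.pyRange 0 m)) (PySem.Dict.empty : PySem.Dict Int Int)
      (PySem.List.pyRange 0 m)
    = List.foldl (fun d v => d.insert v (d.getD v 0 + 1))
        (PySem.Dict.empty : PySem.Dict Int Int)
        ((PySem.List.pyRange 0 m).flatMap (fun r =>
          (PySem.List.pyRange 0 m).map (fun c =>
            PySem.List.pyGetD (PySem.List.pyGetD matrix r []) c 0))) := by
  rw [List.foldl_flatMap]
  simp only [List.foldl_map]

lemma foldl_idx_zip0 (values : List Int) (ps : List (Int × Int)) (mat : List (List Int))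
    (h : ps.length ≤ values.length) :
    (ps.foldl (fun st p => (set2 st.1 p.1 p.2 (PySem.List.pyGetD values st.2 0), st.2 + 1))
        (mat, (0 : Int))).1
      = (ps.zip values).foldl wr mat := by
  have h0 := foldl_idx_zip values ps 0 mat (by omega)
  simpa using h0

lemma values_len (cells : List Int) :
    ((PySem.List.sorted2
        (List.foldl (fun d v => d.insert v (d.getD v 0 + 1))
          (PySem.Dict.empty : PySem.Dict Int Int) cells).items
        (fun x => x.2) (fun x => x.1)).flatMap (fun p => List.replicate p.2.toNat p.1)).length
      = cells.length := by
  rw [PySem.Dict.foldl_insert_getD_add_one_eq_counter, List.length_flatMap]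
  have hperm : (PySem.List.sorted2 (PySem.Dict.counter cells).items
      (fun x => x.2) (fun x => x.1)).Perm (PySem.Dict.counter cells).items :=
    PySem.List.sorted2_perm _ _ _ _
  rw [(hperm.map (fun a => (List.replicate a.2.toNat a.1).length)).sum_eq]
  rw [PySem.Dict.items_counter, List.map_map]
  have hperm2 : (PySem.Set.ofList cells).Perm cells.dedup := by
    refine (List.perm_ext_iff_of_nodup (PySem.Set.nodup_ofList cells) (List.nodup_dedup cells)).2
      (fun a => ?_)
    rw [PySem.Set.mem_ofList, List.mem_dedup]
  calc (List.map ((fun a => (List.replicate a.2.toNat a.1).length) ∘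
          fun k => (k, ((List.count k cells : Nat) : Int))) (PySem.Set.ofList cells)).sum
      = (List.map (fun x => List.count x cells) (PySem.Set.ofList cells)).sum := by
        apply congrArg
        apply List.map_congr_left
        intro k _
        simp [Int.toNat_natCast]
    _ = (List.map (fun x => List.count x cells) cells.dedup).sum :=
        (hperm2.map (fun x => List.count x cells)).sum_eq
    _ = cells.length := List.sum_map_count_dedup_eq_length cells

lemma cells_len (matrix : List (List Int)) :
    (((PySem.List.pyRange 0 (matrix.length : Int)).flatMap (fun r =>
      (PySem.List.pyRange 0 (matrix.length : Int)).map (fun c =>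
        PySem.List.pyGetD (PySem.List.pyGetD matrix r []) c 0)))).length
      = matrix.length * matrix.length := by
  rw [List.length_flatMap]
  have h1 : ∀ r : Int, ((PySem.List.pyRange 0 (matrix.length : Int)).map (fun c =>
      PySem.List.pyGetD (PySem.List.pyGetD matrix r []) c 0)).length = matrix.length := by
    intro r
    rw [List.length_map, PySem.List.length_pyRange_one]
    omega
  rw [List.map_congr_left (fun r _ => by rw [List.length_map, PySem.List.length_pyRange_one])]
  simp [List.map_const', List.sum_replicate, PySem.List.length_pyRange_one]

lemma assemble (matrix : List (List Int)) (values : List Int)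
    (hm : 1 ≤ ((matrix.length : Nat) : Int))
    (hlen : values.length = matrix.length * matrix.length) :
    (List.foldl (stepA ((matrix.length : Nat) : Int))
        (matrix, ((matrix.length : Nat) : Int) - 1, ((matrix.length : Nat) : Int) - 1,
          ((matrix.length : Nat) : Int) - 1, ((matrix.length : Nat) : Int) - 1) values).1
    = (List.foldl (fun st p => (set2 st.1 p.1 p.2 (PySem.List.pyGetD values st.2 0), st.2 + 1))
        (matrix, (0 : Int))
        (posFrom ((matrix.length : Nat) : Int) (2 * ((matrix.length : Nat) : Int) - 2))).1 := by
  have hplen : (posFrom ((matrix.length : Nat) : Int)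
      (2 * ((matrix.length : Nat) : Int) - 2)).length = matrix.length * matrix.length := by
    have h := posFrom_len ((matrix.length : Nat) : Int) hm
    exact_mod_cast h
  rw [foldl_stepA_zip, foldl_idx_zip0 values _ matrix (by rw [hplen, hlen])]
  have htraj : trajFrom ((matrix.length : Nat) : Int)
      ((matrix, ((matrix.length : Nat) : Int) - 1, ((matrix.length : Nat) : Int) - 1,
        ((matrix.length : Nat) : Int) - 1, ((matrix.length : Nat) : Int) - 1) :
        List (List Int) × Int × Int × Int × Int).2 values.length
      = posFrom ((matrix.length : Nat) : Int) (2 * ((matrix.length : Nat) : Int) - 2) := by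
    have hcount : values.length
        = (posFrom ((matrix.length : Nat) : Int)
            (2 * ((matrix.length : Nat) : Int) - 2)).length := by rw [hplen, hlen]
    rw [hcount]
    have hst := startSt_top ((matrix.length : Nat) : Int) hm
    rw [show ((matrix, ((matrix.length : Nat) : Int) - 1, ((matrix.length : Nat) : Int) - 1,
        ((matrix.length : Nat) : Int) - 1, ((matrix.length : Nat) : Int) - 1) :
        List (List Int) × Int × Int × Int × Int).2
      = startSt ((matrix.length : Nat) : Int) (2 * ((matrix.length : Nat) : Int) - 2) from by
        rw [hst]]
    exact diags ((matrix.length : Nat) : Int)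
      (2 * ((matrix.length : Nat) : Int) - 2).toNat _ (by omega) (by omega)
  rw [htraj]

lemma core_eq (matrix : List (List Int)) :
    sortMatrixByOccurrences matrix = sortMatrixByOccurrences_alt matrix := by
  unfold sortMatrixByOccurrences sortMatrixByOccurrences_alt
  by_cases h1 : matrix.length = 0
  · simp only [if_pos h1]
  by_cases h2 : (matrix.headD []).length = 0
  · simp only [if_neg h1, if_pos h2]
  simp only [if_neg h1, if_neg h2]
  have hm : 1 ≤ ((matrix.length : Nat) : Int) := by
    have := Nat.pos_of_ne_zero h1
    omega
  rw [freq_flat, PySem.List.foldl_append_eq_flatMap, List.nil_append, A_flat, B_flat]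
  exact assemble matrix _ hm (by rw [values_len, cells_len])

-- ===== VERDICT (by name: the statement is the Claim_ definition above) =====
theorem sortMatrixByOccurrences_spec : Claim_equal_sortMatrixByOccurrences := by
  intro matrix _ _
  unfold Spec_sortMatrixByOccurrences
  exact core_eq matrix
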